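-- pv_equiv track=rewrite | github.com/andreinegru10/proiect_ACI | scripts/Voter.py | dictMaxx
-- ===== SOURCE A (Python) =====
-- def dictMaxx(d, placeholder):
--     maxx = 0
--     c = placeholder
--
--     for k in d:
--         v, p = d[k]
--         if v > maxx:
--             maxx = v
--             c = k
--
--     minP = 3
--
--     if maxx == 1:
--         for k in d:
--             if k != placeholder:
--                 v, p = d[k]
--                 if p < minP:
--                     minP = p
--                     c = k
--     else:
--         if c == placeholder:
--             c = ""
--
--     return maxx, c
-- ===== SOURCE B (Python) =====
-- def dictMaxx(d, placeholder):
--     top = max([v for v, _ in d.values()], default=0)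
--     if top > 0:
--         maxx = top
--         c = next(k for k, (v, _) in d.items() if v == top)
--     else:
--         maxx = 0
--         c = placeholder
--     if maxx == 1:
--         cand = [(k, p) for k, (v, p) in d.items() if k != placeholder and p < 3]
--         if cand:
--             best = min(p for _, p in cand)
--             c = next(k for k, p in cand if p == best)
--     elif c == placeholder:
--         c = ""
--     return maxx, c
-- ===== Notes on version B (the rewrite author's own statement) =====
-- stated objective: alternative
-- what changed: A's two stateful accumulator loops (running max with first-key tie-break, then a running min over non-placeholder keys) are replaced by declarative max/min/first-match queries over comprehensions: max of the values with default 0, next() for the first key attaining it, and a filtered candidate list whose min priority and first achieving key decide the maxx==1 tie-break.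
import Mathlib
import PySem

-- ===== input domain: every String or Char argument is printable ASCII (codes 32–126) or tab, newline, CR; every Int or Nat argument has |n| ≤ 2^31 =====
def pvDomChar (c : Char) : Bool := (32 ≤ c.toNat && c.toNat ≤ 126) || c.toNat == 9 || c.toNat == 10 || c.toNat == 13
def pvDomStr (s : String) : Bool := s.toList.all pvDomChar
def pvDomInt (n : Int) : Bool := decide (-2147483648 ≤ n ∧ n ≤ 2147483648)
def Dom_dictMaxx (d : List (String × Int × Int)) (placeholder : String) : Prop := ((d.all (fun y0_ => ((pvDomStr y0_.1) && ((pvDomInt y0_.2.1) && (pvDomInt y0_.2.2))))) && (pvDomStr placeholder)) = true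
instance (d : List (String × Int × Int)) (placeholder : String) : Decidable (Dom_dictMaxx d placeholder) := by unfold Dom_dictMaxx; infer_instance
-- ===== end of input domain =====

-- B replaces A's two accumulator loops (running max with first-key tie-break, then a running
-- min over non-placeholder keys) by max/min/find-first queries over comprehensions; alternative
-- decomposition, same O(n) cost.

-- ===== PORT A =====
-- `v, p = d[k]`: first-match lookup in the dict; k comes from iterating d itself, so the
-- lookup never misses and the (0, 0) default is unreachable.
def dictMaxxGet (d : List (String × Int × Int)) (k : String) : Int × Int :=
  ((PySem.Dict.mk d).get? k).getD (0, 0)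

def dictMaxx (d : List (String × Int × Int)) (placeholder : String) : Int × String :=
  let s1 := d.foldl (fun (s : Int × String) kv =>
      let vp := dictMaxxGet d kv.1
      if vp.1 > s.1 then (vp.1, kv.1) else s) (0, placeholder)
  let maxx := s1.1
  let c := s1.2
  if maxx == 1 then
    let s2 := d.foldl (fun (s : Int × String) kv =>
        if kv.1 != placeholder then
          let vp := dictMaxxGet d kv.1
          if vp.2 < s.1 then (vp.2, kv.1) else s
        else s) (3, c)
    (maxx, s2.2)
  else
    (maxx, if c == placeholder then "" else c)

-- ===== PORT B =====
def dictMaxx_alt (d : List (String × Int × Int)) (placeholder : String) : Int × String :=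
  let top := PySem.List.maxD (d.map (fun kv => kv.2.1)) (fun v => v) 0
  let mc : Int × String :=
    if top > 0 then
      -- next(...): top is attained, so the default is unreachable
      (top, ((d.find? (fun kv => kv.2.1 == top)).map (fun kv => kv.1)).getD placeholder)
    else
      (0, placeholder)
  if mc.1 == 1 then
    let cand := (d.filter (fun kv => kv.1 != placeholder && kv.2.2 < 3)).map (fun kv => (kv.1, kv.2.2))
    match cand with
    | [] => mc
    | _ :: _ =>
      -- min(...) of a nonempty list; the defaults are unreachable
      let best := (PySem.List.min? (cand.map (fun t => t.2)) (fun p => p)).getD 3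
      (mc.1, ((cand.find? (fun t => t.2 == best)).map (fun t => t.1)).getD mc.2)
  else
    (mc.1, if mc.2 == placeholder then "" else mc.2)

-- ===== PRECONDITION & SPEC =====
-- Pre_ excludes association lists with a duplicated key: they represent no Python dict
-- (a dict literal collapses duplicate keys before dictMaxx ever runs), so nothing is claimed there.
def Pre_dictMaxx (d : List (String × Int × Int)) (placeholder : String) : Prop :=
  (d.map Prod.fst).Nodup

instance (d : List (String × Int × Int)) (placeholder : String) : Decidable (Pre_dictMaxx d placeholder) := by
  unfold Pre_dictMaxx; infer_instance

def pvWitness_dictMaxx : (List (String × Int × Int)) × String :=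
  ([("a", 1, 2), ("b", 1, 0), ("c", 0, 1)], "a")

def Spec_dictMaxx (d : List (String × Int × Int)) (placeholder : String) (out : Int × String) : Prop := out = dictMaxx_alt d placeholder
instance (d : List (String × Int × Int)) (placeholder : String) (out : Int × String) : Decidable (Spec_dictMaxx d placeholder out) := by unfold Spec_dictMaxx; infer_instance

-- ===== CLAIM (what is proved, stated in full; the proofs are below) =====
def Claim_equal_dictMaxx : Prop := ∀ (d : List (String × Int × Int)) (placeholder : String), Dom_dictMaxx d placeholder → Pre_dictMaxx d placeholder → Spec_dictMaxx d placeholder (dictMaxx d placeholder)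

-- ===== LEMMAS AND PROOFS =====

-- the dict lookup of a key taken from an entry of d returns that entry's value (keys Nodup)
theorem dictMaxxGet_eq {d : List (String × Int × Int)} (hnd : (d.map Prod.fst).Nodup)
    {kv : String × Int × Int} (hm : kv ∈ d) : dictMaxxGet d kv.1 = kv.2 := by
  have h := PySem.Dict.get?_of_mem_items (PySem.Dict.mk d) (k := kv.1) (v := kv.2)
  simp only [PySem.Dict.keys_mk] at h
  have : (PySem.Dict.mk d).get? kv.1 = some kv.2 := h (by simpa using hm) hnd
  simp [dictMaxxGet, this]

-- characterization of A's first loop: running max with strict `>` from (m, c0) computes the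
-- fold of max, and the key of the FIRST entry attaining it when it exceeds m
theorem maxLoop (l : List (String × Int × Int)) (m : Int) (c0 : String) :
    l.foldl (fun (s : Int × String) kv => if kv.2.1 > s.1 then (kv.2.1, kv.1) else s) (m, c0)
      = (l.foldl (fun a kv => max a kv.2.1) m,
         if m < l.foldl (fun a kv => max a kv.2.1) m
         then ((l.find? (fun kv => kv.2.1 == l.foldl (fun a kv => max a kv.2.1) m)).map (fun kv => kv.1)).getD c0
         else c0) := by
  induction l generalizing m c0 with
  | nil => simp
  | cons kv t ih =>
    simp only [List.foldl_cons]
    by_cases h : kv.2.1 > m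
    · rw [if_pos h, ih kv.2.1 kv.1]
      have hmax : max m kv.2.1 = kv.2.1 := by omega
      rw [hmax]
      have hle := (PySem.List.le_foldl_max_int t (fun kv => kv.2.1) kv.2.1).1
      by_cases h2 : kv.2.1 < t.foldl (fun a kv => max a kv.2.1) kv.2.1
      · have hm : m < t.foldl (fun a kv => max a kv.2.1) kv.2.1 := by omega
        -- the strictly larger final max is attained inside t
        have hmem : t.foldl (fun a kv => max a kv.2.1) kv.2.1 ∈ t.map (fun kv => kv.2.1) := by
          have hfm := PySem.List.foldl_max_mem (t.map (fun kv => kv.2.1)) kv.2.1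
          rw [List.foldl_map] at hfm
          rcases hfm with heq | hmem
          · omega
          · exact hmem
        obtain ⟨y, hy, hpy⟩ := List.mem_map.mp hmem
        have hfs : (t.find? (fun e => e.2.1 == t.foldl (fun a kv => max a kv.2.1) kv.2.1)).isSome :=
          List.find?_isSome.mpr ⟨y, hy, by simp only [beq_iff_eq]; exact hpy⟩
        obtain ⟨z, hz⟩ := Option.isSome_iff_exists.mp hfs
        have hne : (kv.2.1 == t.foldl (fun a kv => max a kv.2.1) kv.2.1) = false := by
          simp; omega
        rw [if_pos h2, if_pos hm]
        simp [hne, hz]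
      · have heq : t.foldl (fun a kv => max a kv.2.1) kv.2.1 = kv.2.1 := by omega
        have hm : m < t.foldl (fun a kv => max a kv.2.1) kv.2.1 := by omega
        rw [if_neg h2, if_pos hm]
        simp [heq]
    · rw [if_neg h, ih m c0]
      have hmax : max m kv.2.1 = m := by omega
      rw [hmax]
      by_cases h2 : m < t.foldl (fun a kv => max a kv.2.1) m
      · have hne : (kv.2.1 == t.foldl (fun a kv => max a kv.2.1) m) = false := by
          simp; omega
        simp only [if_pos h2, List.find?_cons, hne]
      · simp [if_neg h2]

-- the projected running min never exceeds its start
theorem foldlMin_le_init (l : List (String × Int × Int)) (m : Int) :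
    l.foldl (fun a kv => min a kv.2.2) m ≤ m := by
  induction l generalizing m with
  | nil => simp
  | cons kv t ih => exact le_trans (ih (min m kv.2.2)) (by omega)

-- characterization of A's second loop: running min with strict `<`
theorem minLoop (l : List (String × Int × Int)) (m : Int) (c0 : String) :
    l.foldl (fun (s : Int × String) kv => if kv.2.2 < s.1 then (kv.2.2, kv.1) else s) (m, c0)
      = (l.foldl (fun a kv => min a kv.2.2) m,
         if l.foldl (fun a kv => min a kv.2.2) m < m
         then ((l.find? (fun kv => kv.2.2 == l.foldl (fun a kv => min a kv.2.2) m)).map (fun kv => kv.1)).getD c0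
         else c0) := by
  induction l generalizing m c0 with
  | nil => simp
  | cons kv t ih =>
    simp only [List.foldl_cons]
    by_cases h : kv.2.2 < m
    · rw [if_pos h, ih kv.2.2 kv.1]
      have hmin : min m kv.2.2 = kv.2.2 := by omega
      rw [hmin]
      have hle := foldlMin_le_init t kv.2.2
      by_cases h2 : t.foldl (fun a kv => min a kv.2.2) kv.2.2 < kv.2.2
      · have hm : t.foldl (fun a kv => min a kv.2.2) kv.2.2 < m := by omega
        -- the strictly smaller final min is attained inside t
        have hmem : t.foldl (fun a kv => min a kv.2.2) kv.2.2 ∈ t.map (fun kv => kv.2.2) := by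
          have hfm := PySem.List.foldl_min_mem (t.map (fun kv => kv.2.2)) kv.2.2
          rw [List.foldl_map] at hfm
          rcases hfm with heq | hmem
          · omega
          · exact hmem
        obtain ⟨y, hy, hpy⟩ := List.mem_map.mp hmem
        have hfs : (t.find? (fun e => e.2.2 == t.foldl (fun a kv => min a kv.2.2) kv.2.2)).isSome :=
          List.find?_isSome.mpr ⟨y, hy, by simp only [beq_iff_eq]; exact hpy⟩
        obtain ⟨z, hz⟩ := Option.isSome_iff_exists.mp hfs
        have hne : (kv.2.2 == t.foldl (fun a kv => min a kv.2.2) kv.2.2) = false := by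
          simp; omega
        rw [if_pos h2, if_pos hm]
        simp [hne, hz]
      · have heq : t.foldl (fun a kv => min a kv.2.2) kv.2.2 = kv.2.2 := by omega
        have hm : t.foldl (fun a kv => min a kv.2.2) kv.2.2 < m := by omega
        rw [if_neg h2, if_pos hm]
        simp [heq]
    · rw [if_neg h, ih m c0]
      have hmin : min m kv.2.2 = m := by omega
      rw [hmin]
      by_cases h2 : t.foldl (fun a kv => min a kv.2.2) m < m
      · have hne : (kv.2.2 == t.foldl (fun a kv => min a kv.2.2) m) = false := by
          simp; omega
        simp only [if_pos h2, List.find?_cons, hne]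
      · simp [if_neg h2]

-- entries with p ≥ 3 never move a running min started at ≤ 3
theorem foldlMin_filter3 (l : List (String × Int × Int)) (m : Int) (hm : m ≤ 3) :
    l.foldl (fun a kv => min a kv.2.2) m
      = (l.filter (fun kv => kv.2.2 < 3)).foldl (fun a kv => min a kv.2.2) m := by
  induction l generalizing m with
  | nil => simp
  | cons kv t ih =>
    simp only [List.foldl_cons, List.filter_cons]
    by_cases h : kv.2.2 < 3
    · rw [if_pos (by simpa using h), List.foldl_cons]
      exact ih (min m kv.2.2) (by omega)
    · have hm' : min m kv.2.2 = m := by omega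
      rw [if_neg (by simpa using h), hm']
      exact ih m hm

-- splitting the start of a running max
theorem foldl_max_init (a b : Int) (l : List Int) :
    l.foldl max (max a b) = max a (l.foldl max b) := by
  induction l generalizing b with
  | nil => rfl
  | cons x t ih =>
    simp only [List.foldl_cons, max_assoc]
    exact ih (max b x)

-- splitting the start of a running min
theorem foldl_min_init (a b : Int) (l : List Int) :
    l.foldl min (min a b) = min a (l.foldl min b) := by
  induction l generalizing b with
  | nil => rfl
  | cons x t ih =>
    simp only [List.foldl_cons, min_assoc]
    exact ih (min b x)

-- proof-only canonical form both ports are reduced to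
def pvM1 (d : List (String × Int × Int)) : Int := d.foldl (fun a kv => max a kv.2.1) 0
def pvF1 (d : List (String × Int × Int)) (ph : String) : List (String × Int × Int) :=
  d.filter (fun kv => kv.1 != ph)
def pvMm (d : List (String × Int × Int)) (ph : String) : Int :=
  (pvF1 d ph).foldl (fun a kv => min a kv.2.2) 3
def canon (d : List (String × Int × Int)) (ph : String) : Int × String :=
  let M := pvM1 d
  let c := if 0 < M then ((d.find? (fun kv => kv.2.1 == M)).map (fun kv => kv.1)).getD ph else ph
  if M == 1 then
    (M, if pvMm d ph < 3
        then (((pvF1 d ph).find? (fun kv => kv.2.2 == pvMm d ph)).map (fun kv => kv.1)).getD c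
        else c)
  else (M, if c == ph then "" else c)

theorem A_eq_canon (d : List (String × Int × Int)) (ph : String)
    (hnd : (d.map Prod.fst).Nodup) : dictMaxx d ph = canon d ph := by
  unfold dictMaxx canon
  rw [PySem.List.foldl_congr_mem d
      (fun (s : Int × String) kv => let vp := dictMaxxGet d kv.1; if vp.1 > s.1 then (vp.1, kv.1) else s)
      (fun (s : Int × String) kv => if kv.2.1 > s.1 then (kv.2.1, kv.1) else s) (0, ph)
      (fun acc x hx => by simp only [dictMaxxGet_eq hnd hx]),
    maxLoop]
  dsimp only
  rw [PySem.List.foldl_congr_mem d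
      (fun (s : Int × String) kv => if kv.1 != ph then (let vp := dictMaxxGet d kv.1; if vp.2 < s.1 then (vp.2, kv.1) else s) else s)
      (fun (s : Int × String) kv => if kv.1 != ph then (if kv.2.2 < s.1 then (kv.2.2, kv.1) else s) else s) _
      (fun acc x hx => by simp only [dictMaxxGet_eq hnd hx])]
  simp only [PySem.List.foldl_if_eq_foldl_filter]
  rw [minLoop]
  simp only [pvM1, pvF1, pvMm]

-- the maxx == 1 branch: B's filter/min/find queries equal canon's running-min form
theorem phase2 (d : List (String × Int × Int)) (ph : String) (m : Int) (c : String) :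
    (match (d.filter (fun kv => kv.1 != ph && kv.2.2 < 3)).map (fun kv => (kv.1, kv.2.2)) with
     | [] => (m, c)
     | _ :: _ =>
       (m, ((((d.filter (fun kv => kv.1 != ph && kv.2.2 < 3)).map (fun kv => (kv.1, kv.2.2))).find?
              (fun t => t.2 ==
                (PySem.List.min? (((d.filter (fun kv => kv.1 != ph && kv.2.2 < 3)).map
                    (fun kv => (kv.1, kv.2.2))).map (fun t => t.2)) (fun p => p)).getD 3)).map
              (fun t => t.1)).getD c))
    = (m, if pvMm d ph < 3
          then (((pvF1 d ph).find? (fun kv => kv.2.2 == pvMm d ph)).map (fun kv => kv.1)).getD c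
          else c) := by
  have hf2 : (pvF1 d ph).filter (fun kv => kv.2.2 < 3)
      = d.filter (fun kv => kv.1 != ph && kv.2.2 < 3) := by
    unfold pvF1
    rw [List.filter_filter]
    exact List.filter_congr (fun x _ => by rw [Bool.and_comm])
  have hMm : pvMm d ph
      = (d.filter (fun kv => kv.1 != ph && kv.2.2 < 3)).foldl (fun a kv => min a kv.2.2) 3 := by
    unfold pvMm
    rw [foldlMin_filter3 _ 3 le_rfl, hf2]
  cases hcase : d.filter (fun kv => kv.1 != ph && kv.2.2 < 3) with
  | nil =>
    rw [hcase] at hMm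
    simp only [hcase, List.map_nil, List.foldl_nil] at *
    rw [hMm]
    simp
  | cons x t2 =>
    have hx3 : x.2.2 < 3 := by
      have hx : x ∈ d.filter (fun kv => kv.1 != ph && kv.2.2 < 3) := by
        rw [hcase]; exact List.mem_cons_self
      have := (List.mem_filter.mp hx).2
      simp at this
      omega
    have hbest : (PySem.List.min? (((x :: t2).map (fun kv => (kv.1, kv.2.2))).map (fun t => t.2)) (fun p => p)).getD 3
        = (t2.map (fun kv => kv.2.2)).foldl min x.2.2 := by
      rw [List.map_map]
      have : (x :: t2).map ((fun (t : String × Int) => t.2) ∘ (fun kv : String × Int × Int => (kv.1, kv.2.2)))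
          = x.2.2 :: t2.map (fun kv => kv.2.2) := by simp [Function.comp]
      rw [this, PySem.List.min?_id_cons]
      rfl
    have hble : (t2.map (fun kv => kv.2.2)).foldl min x.2.2 ≤ x.2.2 :=
      (PySem.List.foldl_min_le (t2.map (fun kv => kv.2.2)) x.2.2).1
    have hMm2 : pvMm d ph = (t2.map (fun kv => kv.2.2)).foldl min x.2.2 := by
      rw [hMm, hcase, List.foldl_cons]
      rw [← List.foldl_map (f := fun kv : String × Int × Int => kv.2.2) (g := min)]
      have h3 : min (3 : Int) x.2.2 = min 3 x.2.2 := rfl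
      calc (t2.map (fun kv => kv.2.2)).foldl min (min 3 x.2.2)
          = min 3 ((t2.map (fun kv => kv.2.2)).foldl min x.2.2) := foldl_min_init 3 x.2.2 _
        _ = (t2.map (fun kv => kv.2.2)).foldl min x.2.2 := by omega
    have hMlt : pvMm d ph < 3 := by omega
    simp only [List.map_cons]
    rw [if_pos hMlt]
    -- reduce the match and push find? through the map
    show (m, ((((x :: t2).map (fun kv => (kv.1, kv.2.2))).find? (fun t => t.2 ==
          (PySem.List.min? (((x :: t2).map (fun kv => (kv.1, kv.2.2))).map (fun t => t.2)) (fun p => p)).getD 3)).map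
          (fun t => t.1)).getD c) = _
    rw [hbest, List.find?_map]
    have hpred : ((fun (t : String × Int) => t.2 == (t2.map (fun kv => kv.2.2)).foldl min x.2.2)
          ∘ (fun kv : String × Int × Int => (kv.1, kv.2.2)))
        = fun kv : String × Int × Int => kv.2.2 == pvMm d ph := by
      funext a; simp [Function.comp, hMm2]
    rw [hpred]
    -- replace the find? over the doubly filtered list by the find? over pvF1
    have hfind : (x :: t2).find? (fun kv => kv.2.2 == pvMm d ph)
        = (pvF1 d ph).find? (fun kv => kv.2.2 == pvMm d ph) := by
      rw [← hcase, ← hf2, List.find?_filter]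
      congr 1
      funext a
      by_cases h : a.2.2 = pvMm d ph
      · simp [h]; omega
      · simp [h]
    rw [hfind]
    cases List.find? (fun kv => kv.2.2 == pvMm d ph) (pvF1 d ph) <;> rfl

theorem B_eq_canon (d : List (String × Int × Int)) (ph : String) :
    dictMaxx_alt d ph = canon d ph := by
  unfold dictMaxx_alt canon
  cases d with
  | nil => simp [PySem.List.maxD, PySem.List.max?, pvM1]
  | cons hd tl =>
    have htop : PySem.List.maxD ((hd :: tl).map (fun kv => kv.2.1)) (fun v => v) 0
        = (tl.map (fun kv => kv.2.1)).foldl max hd.2.1 := by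
      simp [PySem.List.maxD, PySem.List.max?_id_cons]
    have hM : pvM1 (hd :: tl) = max 0 ((tl.map (fun kv => kv.2.1)).foldl max hd.2.1) := by
      unfold pvM1
      rw [← List.foldl_map (f := fun kv : String × Int × Int => kv.2.1) (g := max), List.map_cons,
        List.foldl_cons]
      exact foldl_max_init 0 hd.2.1 _
    dsimp only
    rw [htop]
    by_cases h0 : 0 < (tl.map (fun kv => kv.2.1)).foldl max hd.2.1
    · have hMt : pvM1 (hd :: tl) = (tl.map (fun kv => kv.2.1)).foldl max hd.2.1 := by
        rw [hM]; exact max_eq_right (le_of_lt h0)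
      rw [if_pos h0, hMt, if_pos h0]
      by_cases h1 : (tl.map (fun kv => kv.2.1)).foldl max hd.2.1 = 1
      · rw [if_pos (by simpa using h1), if_pos (by simpa using h1)]
        dsimp only
        exact phase2 (hd :: tl) ph _ _
      · have hb : ¬ (((tl.map (fun kv => kv.2.1)).foldl max hd.2.1 == 1) = true) := by
          simpa using h1
        rw [if_neg hb, if_neg hb]
    · have hMt : pvM1 (hd :: tl) = 0 := by
        rw [hM]; exact max_eq_left (by omega)
      rw [if_neg h0, hMt]
      have h00 : ¬ (0 : Int) < 0 := by omega
      rw [if_neg h00]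
      have h01 : ((0 : Int) == 1) = false := by decide
      rw [h01]
      simp

-- ===== VERDICT (by name: the statement is the Claim_ definition above) =====
theorem dictMaxx_spec : Claim_equal_dictMaxx := by
  intro d placeholder _ hnd
  unfold Spec_dictMaxx
  rw [A_eq_canon d placeholder hnd, B_eq_canon]
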